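-- pv_equiv track=rewrite | github.com/Madjid-CH/aoc2024 | src/day18/day18.py | get_blocking_coordinates
-- ===== SOURCE A (Python) =====
-- from collections import namedtuple, deque
--
-- State = namedtuple("State", ["r", "c", "distance"])
--
-- def count_steps(fallen_blocks, grid_dim):
--     queue = deque([State(0, 0, 0)])
--     seen = set()
--     while queue:
--         state = queue.popleft()
--         if (state.r, state.c) in seen:
--             continue
--         seen.add((state.r, state.c))
--         if state.r == grid_dim[0] - 1 and state.c == grid_dim[1] - 1:
--             return state.distance
--         for dr, dc in ((-1, 0), (1, 0), (0, -1), (0, 1)):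
--             nr, nc = state.r + dr, state.c + dc
--             if (
--                 0 <= nr < grid_dim[0]
--                 and 0 <= nc < grid_dim[1]
--                 and (nr, nc) not in fallen_blocks
--             ):
--                 queue.append(State(nr, nc, state.distance + 1))
--
--     return -1
--
-- def get_blocking_coordinates(blocks, grid_dim):
--     lo, hi = 0, len(blocks) - 1
--     while lo < hi:
--         mid = (lo + hi) // 2
--         if count_steps(blocks[: mid + 1], grid_dim) != -1:
--             lo = mid + 1
--         else:
--             hi = mid
--     return blocks[lo]
-- ===== SOURCE B (Python) =====
-- from collections import deque
--
--
-- def _flood(blocked, reach, frontier, grid_dim):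
--     """Grow `reach` (the region connected to the start) from `frontier` cells."""
--     rows, cols = grid_dim
--     while frontier:
--         r, c = frontier.popleft()
--         for n in ((r - 1, c), (r + 1, c), (r, c - 1), (r, c + 1)):
--             if (0 <= n[0] < rows and 0 <= n[1] < cols
--                     and n not in blocked and n not in reach):
--                 reach.add(n)
--                 frontier.append(n)
--
--
-- def get_blocking_coordinates(blocks, grid_dim):
--     rows, cols = grid_dim
--     target = (rows - 1, cols - 1)
--     first = {}
--     for i, b in enumerate(blocks):
--         if b not in first:
--             first[b] = i
--     blocked = set(first)
--     reach = {(0, 0)}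
--     _flood(blocked, reach, deque([(0, 0)]), grid_dim)
--     if target in reach:
--         return blocks[-1]
--     for i in range(len(blocks) - 1, -1, -1):
--         b = blocks[i]
--         if first[b] == i:
--             blocked.discard(b)
--             r, c = b
--             if 0 <= r < rows and 0 <= c < cols and b not in reach and (
--                     b == (0, 0)
--                     or (r - 1, c) in reach or (r + 1, c) in reach
--                     or (r, c - 1) in reach or (r, c + 1) in reach):
--                 reach.add(b)
--                 _flood(blocked, reach, deque([b]), grid_dim)
--         if target in reach:
--             return blocks[i]
--     return blocks[0]
-- ===== Notes on version B (the rewrite author's own statement) =====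
-- stated objective: alternative
-- what changed: A binary-searches the block list, running a full BFS over the grid for each probe; B places all blocks once, flood-fills the region reachable from the start a single time, then removes blocks back-to-front (first occurrences only, via a first-index dict), re-flooding incrementally from a freed cell only when it touches that region, and returns the block at which the endpoints first become connected; intended as asymptotically faster (O(R*C+N) vs O(R*C*log N), measured 16-40x where both finish) but unconfirmed at the largest sizes, where both time out on huge sparse grids.
import Mathlib
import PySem

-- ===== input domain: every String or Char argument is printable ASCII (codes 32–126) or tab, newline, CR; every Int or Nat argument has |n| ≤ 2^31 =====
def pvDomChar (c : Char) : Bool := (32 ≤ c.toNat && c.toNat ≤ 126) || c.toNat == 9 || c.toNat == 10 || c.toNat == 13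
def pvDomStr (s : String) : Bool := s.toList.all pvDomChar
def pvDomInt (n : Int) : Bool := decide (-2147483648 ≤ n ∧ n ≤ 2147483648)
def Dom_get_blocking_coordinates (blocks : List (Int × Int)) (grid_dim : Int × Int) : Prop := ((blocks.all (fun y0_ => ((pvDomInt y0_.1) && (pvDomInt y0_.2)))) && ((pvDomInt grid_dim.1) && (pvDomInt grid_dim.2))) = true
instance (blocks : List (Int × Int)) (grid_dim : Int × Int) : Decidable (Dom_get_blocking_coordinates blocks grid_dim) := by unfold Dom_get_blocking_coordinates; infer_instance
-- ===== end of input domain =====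

-- B replaces A's binary search (one full BFS of the grid per probe) by a single reverse sweep:
-- all blocks are placed, the region reachable from the start is flooded once, and blocks are
-- removed back-to-front, re-flooding only from a freed cell adjacent to the region (intended as
-- faster — one grid traversal instead of log N of them; measured 16-40x on inputs where both
-- programs finish, though both still time out on huge sparse grids).

-- ===== PORT A =====
-- the in-grid cells, used only in termination measures
def gridF (gd : Int × Int) : Finset (Int × Int) :=
  ((PySem.List.pyRange 0 gd.1 1).product (PySem.List.pyRange 0 gd.2 1)).toFinset

theorem mem_gridF (gd : Int × Int) (p : Int × Int)
    (h : 0 ≤ p.1 ∧ p.1 < gd.1 ∧ 0 ≤ p.2 ∧ p.2 < gd.2) : p ∈ gridF gd := by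
  obtain ⟨a, b⟩ := p
  simp only [gridF, List.mem_toFinset, List.pair_mem_product, PySem.List.mem_pyRange_one]
  simp only at h
  omega

def bfsCells (queue : List (Int × Int × Int)) : Finset (Int × Int) :=
  (queue.map (fun s => (s.1, s.2.1))).toFinset

-- generic counting step for the termination measures
theorem pv_sdiff_card_step {α : Type} [DecidableEq α] {A' A S : Finset α} {S' : Finset α} {x : α}
    (hA : A' ⊆ A) (hS : S ∪ {x} ⊆ S') (hx : x ∈ A) (hxS : x ∉ S) :
    (A' \ S').card + 1 ≤ (A \ S).card := by
  have h1 : A' \ S' ⊆ (A \ S).erase x := by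
    intro y hy
    simp only [Finset.mem_sdiff, Finset.mem_erase] at hy ⊢
    have hyS : y ∉ S ∧ y ≠ x := by
      constructor
      · intro hc; exact hy.2 (hS (by simp [hc]))
      · intro hc; exact hy.2 (hS (by simp [hc]))
    exact ⟨hyS.2, hA hy.1, hyS.1⟩
  have h2 := Finset.card_le_card h1
  have h3 : x ∈ A \ S := Finset.mem_sdiff.mpr ⟨hx, hxS⟩
  have h4 := Finset.card_erase_of_mem h3
  have h5 : 1 ≤ (A \ S).card := Finset.card_pos.mpr ⟨x, h3⟩
  omega

theorem bfs_meas_skip (gd : Int × Int) (r c d : Int) (rest : List (Int × Int × Int))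
    (seen : List (Int × Int)) :
    ((gridF gd ∪ bfsCells rest) \ seen.toFinset).card
      ≤ ((gridF gd ∪ bfsCells ((r, c, d) :: rest)) \ seen.toFinset).card := by
  apply Finset.card_le_card
  apply Finset.sdiff_subset_sdiff _ (Finset.Subset.refl _)
  apply Finset.union_subset_union_right
  intro y hy
  simp only [bfsCells, List.map_cons, List.toFinset_cons, Finset.mem_insert] at hy ⊢
  exact Or.inr hy

theorem bfs_meas_push (gd : Int × Int) (r c d : Int) (rest new : List (Int × Int × Int))
    (seen : List (Int × Int)) (hnew : bfsCells new ⊆ gridF gd) (hns : (r, c) ∉ seen)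
    (hlen : new.length ≤ 4) :
    5 * ((gridF gd ∪ bfsCells (rest ++ new)) \ (PySem.Set.add seen (r, c)).toFinset).card
        + (rest ++ new).length
      < 5 * ((gridF gd ∪ bfsCells ((r, c, d) :: rest)) \ seen.toFinset).card
        + ((r, c, d) :: rest).length := by
  have hA : gridF gd ∪ bfsCells (rest ++ new) ⊆ gridF gd ∪ bfsCells ((r, c, d) :: rest) := by
    intro y hy
    simp only [bfsCells, List.map_append, List.toFinset_append, List.map_cons,
      List.toFinset_cons, Finset.mem_union, Finset.mem_insert] at hy ⊢
    rcases hy with h | h | h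
    · exact Or.inl h
    · exact Or.inr (Or.inr h)
    · exact Or.inl (hnew (by simpa [bfsCells] using h))
  have hS : seen.toFinset ∪ {(r, c)} ⊆ (PySem.Set.add seen (r, c)).toFinset := by
    rw [PySem.Set.add_of_not_mem hns]
    intro y hy
    simp only [Finset.mem_union, Finset.mem_singleton, List.mem_toFinset, List.mem_append,
      List.mem_singleton] at hy ⊢
    tauto
  have hx : (r, c) ∈ gridF gd ∪ bfsCells ((r, c, d) :: rest) := by
    simp [bfsCells]
  have hxS : (r, c) ∉ seen.toFinset := by simpa using hns
  have := pv_sdiff_card_step hA hS hx hxS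
  have hl : (rest ++ new).length ≤ rest.length + 4 := by simp; omega
  simp only [List.length_cons]
  omega

def bfsLoop (fb : List (Int × Int)) (gd : Int × Int) (queue : List (Int × Int × Int))
    (seen : List (Int × Int)) : Int :=
  match queue with
  | [] => -1
  | (r, c, d) :: rest =>
    if (r, c) ∈ seen then
      bfsLoop fb gd rest seen
    else
      let seen' := PySem.Set.add seen (r, c)
      if r = gd.1 - 1 ∧ c = gd.2 - 1 then d
      else
        let nbrs := [(r - 1, c), (r + 1, c), (r, c - 1), (r, c + 1)].filter
          (fun p => decide (0 ≤ p.1 ∧ p.1 < gd.1 ∧ 0 ≤ p.2 ∧ p.2 < gd.2 ∧ p ∉ fb))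
        bfsLoop fb gd (rest ++ nbrs.map (fun p => (p.1, p.2, d + 1))) seen'
termination_by 5 * ((gridF gd ∪ bfsCells queue) \ seen.toFinset).card + queue.length
decreasing_by
  · have := bfs_meas_skip gd r c d rest seen
    simp only [List.length_cons]
    omega
  · apply bfs_meas_push
    · intro y hy
      simp only [bfsCells, List.mem_toFinset, List.map_map, List.mem_map,
        Function.comp] at hy
      obtain ⟨p, hp, rfl⟩ := hy
      have := List.of_mem_filter hp
      simp only [decide_eq_true_eq] at this
      exact mem_gridF gd p ⟨this.1, this.2.1, this.2.2.1, this.2.2.2.1⟩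
    · assumption
    · have h1 : (List.filter (fun p => decide (0 ≤ p.1 ∧ p.1 < gd.1 ∧ 0 ≤ p.2 ∧ p.2 < gd.2 ∧ p ∉ fb))
          [(r - 1, c), (r + 1, c), (r, c - 1), (r, c + 1)]).length ≤ 4 := by
        have := List.length_filter_le (fun p => decide (0 ≤ p.1 ∧ p.1 < gd.1 ∧ 0 ≤ p.2 ∧ p.2 < gd.2 ∧ p ∉ fb))
          [(r - 1, c), (r + 1, c), (r, c - 1), (r, c + 1)]
        simpa using this
      simpa using h1

def count_steps (fallen_blocks : List (Int × Int)) (grid_dim : Int × Int) : Int :=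
  bfsLoop fallen_blocks grid_dim [(0, 0, 0)] []

def gbcLoop (blocks : List (Int × Int)) (grid_dim : Int × Int) (lo hi : Int) : Int × Int :=
  if h : lo < hi then
    let mid := PySem.Int.floordiv (lo + hi) 2
    if count_steps (PySem.List.slice blocks none (some (mid + 1))) grid_dim ≠ -1 then
      gbcLoop blocks grid_dim (mid + 1) hi
    else
      gbcLoop blocks grid_dim lo mid
  else
    PySem.List.pyGetD blocks lo (0, 0)
termination_by (hi - lo).toNat
decreasing_by
  · have h1 := PySem.Int.floordiv_two_mid_bounds (le_of_lt h)
    omega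
  · have h1 := PySem.Int.floordiv_two_mid_bounds (le_of_lt h)
    have h2 : PySem.Int.floordiv (lo + hi) 2 < hi := by
      rw [PySem.Int.floordiv_lt_iff_lt_mul (by omega)]
      omega
    omega

def get_blocking_coordinates (blocks : List (Int × Int)) (grid_dim : Int × Int) : Int × Int :=
  gbcLoop blocks grid_dim 0 ((blocks.length : Int) - 1)

-- ===== PORT B =====
-- body of the neighbour for-loop of _flood (reach, frontier as the state)
def floodStep (blocked : List (Int × Int)) (gd : Int × Int)
    (st : List (Int × Int) × List (Int × Int)) (n : Int × Int) :
    List (Int × Int) × List (Int × Int) :=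
  if 0 ≤ n.1 ∧ n.1 < gd.1 ∧ 0 ≤ n.2 ∧ n.2 < gd.2 ∧ n ∉ blocked ∧ n ∉ st.1 then
    (PySem.Set.add st.1 n, st.2 ++ [n])
  else st

theorem floodStep_measure (blocked : List (Int × Int)) (gd : Int × Int)
    (st : List (Int × Int) × List (Int × Int)) (n : Int × Int) :
    5 * (gridF gd \ (floodStep blocked gd st n).1.toFinset).card
        + (floodStep blocked gd st n).2.length
      ≤ 5 * (gridF gd \ st.1.toFinset).card + st.2.length := by
  unfold floodStep
  split
  · rename_i hc
    have hg : n ∈ gridF gd := mem_gridF gd n ⟨hc.1, hc.2.1, hc.2.2.1, hc.2.2.2.1⟩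
    have hns : n ∉ st.1 := hc.2.2.2.2.2
    have hstep := pv_sdiff_card_step (A := gridF gd) (A' := gridF gd)
      (S := st.1.toFinset) (S' := (PySem.Set.add st.1 n).toFinset) (x := n)
      (Finset.Subset.refl _) (by
        rw [PySem.Set.add_of_not_mem hns]
        intro y hy
        simp only [Finset.mem_union, Finset.mem_singleton, List.mem_toFinset] at hy ⊢
        simp only [List.mem_append, List.mem_singleton]
        tauto) hg (by simpa using hns)
    simp only [List.length_append, List.length_cons, List.length_nil]
    omega
  · exact le_rfl

theorem floodFold_measure (blocked : List (Int × Int)) (gd : Int × Int) :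
    ∀ (ns : List (Int × Int)) (st : List (Int × Int) × List (Int × Int)),
    5 * (gridF gd \ (ns.foldl (floodStep blocked gd) st).1.toFinset).card
        + (ns.foldl (floodStep blocked gd) st).2.length
      ≤ 5 * (gridF gd \ st.1.toFinset).card + st.2.length := by
  intro ns
  induction ns with
  | nil => intro st; simp
  | cons n ns ih =>
    intro st
    calc 5 * (gridF gd \ ((n :: ns).foldl (floodStep blocked gd) st).1.toFinset).card
          + ((n :: ns).foldl (floodStep blocked gd) st).2.length
        = 5 * (gridF gd \ (ns.foldl (floodStep blocked gd) (floodStep blocked gd st n)).1.toFinset).card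
          + (ns.foldl (floodStep blocked gd) (floodStep blocked gd st n)).2.length := by simp
      _ ≤ 5 * (gridF gd \ (floodStep blocked gd st n).1.toFinset).card
          + (floodStep blocked gd st n).2.length := ih _
      _ ≤ _ := floodStep_measure blocked gd st n

theorem floodFold_measure' (blocked : List (Int × Int)) (gd : Int × Int)
    (ns re fr : List (Int × Int)) :
    5 * (gridF gd \ (ns.foldl (floodStep blocked gd) (re, fr)).1.toFinset).card
        + (ns.foldl (floodStep blocked gd) (re, fr)).2.length
      ≤ 5 * (gridF gd \ re.toFinset).card + fr.length :=
  floodFold_measure blocked gd ns (re, fr)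

def floodLoop (blocked : List (Int × Int)) (gd : Int × Int) (reach : List (Int × Int))
    (frontier : List (Int × Int)) : List (Int × Int) :=
  match frontier with
  | [] => reach
  | (r, c) :: rest =>
    let st := [(r - 1, c), (r + 1, c), (r, c - 1), (r, c + 1)].foldl
      (floodStep blocked gd) (reach, rest)
    floodLoop blocked gd st.1 st.2
termination_by 5 * (gridF gd \ reach.toFinset).card + frontier.length
decreasing_by
  have := floodFold_measure' blocked gd [(r - 1, c), (r + 1, c), (r, c - 1), (r, c + 1)] reach rest
  simp only [List.length_cons]
  omega

def downLoop (blocks : List (Int × Int)) (gd : Int × Int)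
    (first : PySem.Dict (Int × Int) Int) (blocked reach : List (Int × Int)) (i : Nat) :
    Int × Int :=
  let b := PySem.List.pyGetD blocks (i : Int) (0, 0)
  let st :=
    if first.get? b = some (i : Int) then
      let bl := PySem.Set.discard blocked b
      if (0 ≤ b.1 ∧ b.1 < gd.1 ∧ 0 ≤ b.2 ∧ b.2 < gd.2) ∧ b ∉ reach ∧
          (b = (0, 0) ∨ (b.1 - 1, b.2) ∈ reach ∨ (b.1 + 1, b.2) ∈ reach ∨
            (b.1, b.2 - 1) ∈ reach ∨ (b.1, b.2 + 1) ∈ reach) then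
        (bl, floodLoop bl gd (PySem.Set.add reach b) [b])
      else (bl, reach)
    else (blocked, reach)
  if (gd.1 - 1, gd.2 - 1) ∈ st.2 then b
  else
    match i with
    | 0 => PySem.List.pyGetD blocks 0 (0, 0)
    | i' + 1 => downLoop blocks gd first st.1 st.2 i'

def buildFirst (blocks : List (Int × Int)) : PySem.Dict (Int × Int) Int :=
  (PySem.List.enumerate blocks 0).foldl
    (fun d p => if d.contains p.2 then d else d.insert p.2 p.1) PySem.Dict.empty

def get_blocking_coordinates_alt (blocks : List (Int × Int)) (grid_dim : Int × Int) : Int × Int :=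
  let target := (grid_dim.1 - 1, grid_dim.2 - 1)
  let first := buildFirst blocks
  let blocked := PySem.Set.ofList first.keys
  let reach := floodLoop blocked grid_dim (PySem.Set.ofList [(0, 0)]) [(0, 0)]
  if target ∈ reach then PySem.List.pyGetD blocks (-1) (0, 0)
  else downLoop blocks grid_dim first blocked reach (blocks.length - 1)

-- ===== PRECONDITION & SPEC =====
-- Pre_ excludes only the empty block list, on which both A and B raise IndexError (blocks[lo] / blocks[-1]).
def Pre_get_blocking_coordinates (blocks : List (Int × Int)) (grid_dim : Int × Int) : Prop :=
  blocks ≠ []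
instance (blocks : List (Int × Int)) (grid_dim : Int × Int) : Decidable (Pre_get_blocking_coordinates blocks grid_dim) := by unfold Pre_get_blocking_coordinates; infer_instance

def pvWitness_get_blocking_coordinates : (List (Int × Int)) × (Int × Int) :=
  ([(0, 1), (1, 0), (1, 1)], (2, 2))

def Spec_get_blocking_coordinates (blocks : List (Int × Int)) (grid_dim : Int × Int) (out : Int × Int) : Prop := out = get_blocking_coordinates_alt blocks grid_dim
instance (blocks : List (Int × Int)) (grid_dim : Int × Int) (out : Int × Int) : Decidable (Spec_get_blocking_coordinates blocks grid_dim out) := by unfold Spec_get_blocking_coordinates; infer_instance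

-- ===== CLAIM (what is proved, stated in full; the proofs are below) =====
def Claim_equal_get_blocking_coordinates : Prop := ∀ (blocks : List (Int × Int)) (grid_dim : Int × Int), Dom_get_blocking_coordinates blocks grid_dim → Pre_get_blocking_coordinates blocks grid_dim → Spec_get_blocking_coordinates blocks grid_dim (get_blocking_coordinates blocks grid_dim)

-- ===== LEMMAS AND PROOFS =====

-- the reachability relation both searches compute: from a source set, stepping to adjacent
-- in-grid cells not in fb (the start cell itself need not be free nor in the grid — A's BFS
-- enqueues (0,0) unconditionally)
def InGrid (gd : Int × Int) (p : Int × Int) : Prop :=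
  0 ≤ p.1 ∧ p.1 < gd.1 ∧ 0 ≤ p.2 ∧ p.2 < gd.2

def Adj (p q : Int × Int) : Prop :=
  q = (p.1 - 1, p.2) ∨ q = (p.1 + 1, p.2) ∨ q = (p.1, p.2 - 1) ∨ q = (p.1, p.2 + 1)

inductive ReachF (src : Int × Int → Prop) (fb : List (Int × Int)) (gd : Int × Int) :
    Int × Int → Prop
  | base {p : Int × Int} : src p → ReachF src fb gd p
  | step {p q : Int × Int} : ReachF src fb gd p → Adj p q → InGrid gd q → q ∉ fb →
      ReachF src fb gd q

def Reach (fb : List (Int × Int)) (gd : Int × Int) (p : Int × Int) : Prop :=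
  ReachF (fun x => x = (0, 0)) fb gd p

theorem ReachF_mono {src src' : Int × Int → Prop} {fb fb' : List (Int × Int)} {gd : Int × Int}
    (hsrc : ∀ p, src p → src' p) (hfb : ∀ x ∈ fb', x ∈ fb) {p : Int × Int}
    (h : ReachF src fb gd p) : ReachF src' fb' gd p := by
  induction h with
  | base h => exact ReachF.base (hsrc _ h)
  | step _ hadj hgrid hnb ih => exact ReachF.step ih hadj hgrid (fun hc => hnb (hfb _ hc))

theorem ReachF_closed {src : Int × Int → Prop} {fb : List (Int × Int)} {gd : Int × Int}
    (S : Int × Int → Prop) (hsrc : ∀ p, src p → S p)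
    (hcl : ∀ p q, S p → Adj p q → InGrid gd q → q ∉ fb → S q) {p : Int × Int}
    (h : ReachF src fb gd p) : S p := by
  induction h with
  | base h => exact hsrc _ h
  | step _ hadj hgrid hnb ih => exact hcl _ _ ih hadj hgrid hnb

theorem Reach_congr {fb fb' : List (Int × Int)} {gd : Int × Int}
    (h : ∀ x, x ∈ fb ↔ x ∈ fb') (p : Int × Int) : Reach fb gd p ↔ Reach fb' gd p :=
  ⟨ReachF_mono (fun _ h => h) (fun x hx => (h x).mpr hx),
   ReachF_mono (fun _ h => h) (fun x hx => (h x).mp hx)⟩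

-- ---- BFS (A's count_steps) computes Reach ----

theorem mem_nbrs_iff (r c : Int) (q : Int × Int) :
    q ∈ [(r - 1, c), (r + 1, c), (r, c - 1), (r, c + 1)] ↔ Adj (r, c) q := by
  simp [Adj]

theorem bfsLoop_ne_neg_one (fb : List (Int × Int)) (gd : Int × Int) :
    ∀ (queue : List (Int × Int × Int)) (seen : List (Int × Int)),
    (∀ s ∈ queue, Reach fb gd (s.1, s.2.1)) →
    bfsLoop fb gd queue seen ≠ -1 → Reach fb gd (gd.1 - 1, gd.2 - 1) := by
  intro queue seen
  induction queue, seen using bfsLoop.induct fb gd with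
  | case1 seen =>
    intro _ hne
    simp [bfsLoop] at hne
  | case2 seen r c d rest hmem ih =>
    intro hq hne
    have heq : bfsLoop fb gd ((r, c, d) :: rest) seen = bfsLoop fb gd rest seen := by
      rw [bfsLoop]; simp [hmem]
    rw [heq] at hne
    exact ih (fun s hs => hq s (List.mem_cons_of_mem _ hs)) hne
  | case3 seen r c d rest hmem htgt =>
    intro hq _
    have hr : Reach fb gd (r, c) := hq (r, c, d) List.mem_cons_self
    rw [← htgt.1, ← htgt.2]
    exact hr
  | case4 seen r c d rest hmem seen' htgt nbrs ih =>
    intro hq hne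
    have heq : bfsLoop fb gd ((r, c, d) :: rest) seen
        = bfsLoop fb gd (rest ++ nbrs.map (fun p => (p.1, p.2, d + 1))) seen' := by
      rw [bfsLoop]; simp only [if_neg hmem, if_neg htgt]; try rfl
    rw [heq] at hne
    apply ih _ hne
    intro s hs
    rcases List.mem_append.mp hs with h | h
    · exact hq s (List.mem_cons_of_mem _ h)
    · obtain ⟨p, hp, rfl⟩ := List.mem_map.mp h
      have hcond := List.of_mem_filter hp
      simp only [decide_eq_true_eq] at hcond
      have hadj : Adj (r, c) p := (mem_nbrs_iff r c p).mp (List.mem_of_mem_filter hp)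
      have hr : Reach fb gd (r, c) := hq (r, c, d) List.mem_cons_self
      have : Reach fb gd p :=
        ReachF.step hr hadj ⟨hcond.1, hcond.2.1, hcond.2.2.1, hcond.2.2.2.1⟩ hcond.2.2.2.2
      simpa using this

theorem bfsLoop_eq_neg_one (fb : List (Int × Int)) (gd : Int × Int) :
    ∀ (queue : List (Int × Int × Int)) (seen : List (Int × Int)),
    bfsLoop fb gd queue seen = -1 →
    (∀ s ∈ queue, 0 ≤ s.2.2) →
    (∀ p ∈ seen, ¬(p = (gd.1 - 1, gd.2 - 1))) →
    (∀ p ∈ seen, ∀ q, Adj p q → InGrid gd q → q ∉ fb →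
      (q ∈ seen ∨ ∃ s ∈ queue, (s.1, s.2.1) = q)) →
    ∀ x, ReachF (fun y => y ∈ seen ∨ ∃ s ∈ queue, (s.1, s.2.1) = y) fb gd x →
      x ≠ (gd.1 - 1, gd.2 - 1) := by
  intro queue seen
  induction queue, seen using bfsLoop.induct fb gd with
  | case1 seen =>
    intro _ _ h1 h2 x hx
    have hmem : x ∈ seen := by
      refine ReachF_closed (fun y => y ∈ seen) ?_ ?_ hx
      · rintro y (hy | ⟨s, hs, _⟩)
        · exact hy
        · simp at hs
      · intro p q hp hadj hgrid hnb
        rcases h2 p hp q hadj hgrid hnb with h | ⟨s, hs, _⟩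
        · exact h
        · simp at hs
    exact h1 x hmem
  | case2 seen r c d rest hmem ih =>
    intro heq hd h1 h2 x hx
    have heq' : bfsLoop fb gd ((r, c, d) :: rest) seen = bfsLoop fb gd rest seen := by
      rw [bfsLoop]; simp [hmem]
    rw [heq'] at heq
    refine ih heq (fun s hs => hd s (List.mem_cons_of_mem _ hs)) h1 ?_ x ?_
    · intro p hp q hadj hgrid hnb
      rcases h2 p hp q hadj hgrid hnb with h | ⟨s, hs, hcell⟩
      · exact Or.inl h
      · rcases List.mem_cons.mp hs with rfl | hs'
        · exact Or.inl (hcell ▸ hmem)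
        · exact Or.inr ⟨s, hs', hcell⟩
    · refine ReachF_mono ?_ (fun y hy => hy) hx
      rintro y (hy | ⟨s, hs, hcell⟩)
      · exact Or.inl hy
      · rcases List.mem_cons.mp hs with rfl | hs'
        · exact Or.inl (hcell ▸ hmem)
        · exact Or.inr ⟨s, hs', hcell⟩
  | case3 seen r c d rest hmem htgt =>
    intro heq hd _ _ x _
    have heq' : bfsLoop fb gd ((r, c, d) :: rest) seen = d := by
      rw [bfsLoop]; simp only [if_neg hmem, if_pos htgt]
    have hd0 := hd (r, c, d) List.mem_cons_self
    simp only at hd0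
    rw [heq'] at heq
    exact absurd heq (by omega)
  | case4 seen r c d rest hmem seen' htgt nbrs ih =>
    intro heq hd h1 h2 x hx
    have heq' : bfsLoop fb gd ((r, c, d) :: rest) seen
        = bfsLoop fb gd (rest ++ nbrs.map (fun p => (p.1, p.2, d + 1))) seen' := by
      rw [bfsLoop]; simp only [if_neg hmem, if_neg htgt]; try rfl
    rw [heq'] at heq
    have hmem_add : ∀ y, y ∈ seen' ↔ y ∈ seen ∨ y = (r, c) := by
      intro y
      exact PySem.Set.mem_add seen (r, c) y
    refine ih heq ?_ ?_ ?_ x ?_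
    · intro s hs
      rcases List.mem_append.mp hs with h | h
      · exact hd s (List.mem_cons_of_mem _ h)
      · obtain ⟨p, hp, rfl⟩ := List.mem_map.mp h
        have := hd (r, c, d) List.mem_cons_self
        simp at this ⊢
        omega
    · intro p hp
      rcases (hmem_add p).mp hp with h | rfl
      · exact h1 p h
      · intro hc
        rw [Prod.mk.injEq] at hc
        exact htgt hc
    · intro p hp q hadj hgrid hnb
      rcases (hmem_add p).mp hp with h | rfl
      · rcases h2 p h q hadj hgrid hnb with h' | ⟨s, hs, hcell⟩
        · exact Or.inl ((hmem_add q).mpr (Or.inl h'))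
        · rcases List.mem_cons.mp hs with rfl | hs'
          · exact Or.inl ((hmem_add q).mpr (Or.inr hcell.symm))
          · exact Or.inr ⟨s, List.mem_append_left _ hs', hcell⟩
      · -- p = (r, c): q is one of its neighbours and passes the filter
        have hq4 : q ∈ [(r - 1, c), (r + 1, c), (r, c - 1), (r, c + 1)] :=
          (mem_nbrs_iff r c q).mpr hadj
        have hqf : q ∈ nbrs := by
          simp only [nbrs]
          refine List.mem_filter.mpr ⟨hq4, ?_⟩
          simp only [decide_eq_true_eq]
          exact ⟨hgrid.1, hgrid.2.1, hgrid.2.2.1, hgrid.2.2.2, hnb⟩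
        refine Or.inr ⟨(q.1, q.2, d + 1), ?_, rfl⟩
        exact List.mem_append_right _ (List.mem_map.mpr ⟨q, hqf, by simp⟩)
    · refine ReachF_mono ?_ (fun y hy => hy) hx
      rintro y (hy | ⟨s, hs, hcell⟩)
      · exact Or.inl ((hmem_add y).mpr (Or.inl hy))
      · rcases List.mem_cons.mp hs with rfl | hs'
        · exact Or.inl ((hmem_add y).mpr (Or.inr hcell.symm))
        · exact Or.inr ⟨s, List.mem_append_left _ hs', hcell⟩

theorem count_steps_iff (fb : List (Int × Int)) (gd : Int × Int) :
    count_steps fb gd ≠ -1 ↔ Reach fb gd (gd.1 - 1, gd.2 - 1) := by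
  constructor
  · intro hne
    refine bfsLoop_ne_neg_one fb gd [(0, 0, 0)] [] ?_ hne
    intro s hs
    simp only [List.mem_singleton] at hs
    subst hs
    exact ReachF.base rfl
  · intro hr heq
    have := bfsLoop_eq_neg_one fb gd [(0, 0, 0)] [] heq
      (by intro s hs; simp at hs; simp [hs]) (by simp) (by simp)
      (gd.1 - 1, gd.2 - 1)
      (by
        refine ReachF_mono ?_ (fun y hy => hy) hr
        rintro y rfl
        exact Or.inr ⟨(0, 0, 0), by simp, rfl⟩)
    exact this rfl

-- ---- flood fill (B's _flood) computes Reach ----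

-- what the neighbour fold of _flood does to (reach, frontier)
theorem floodFold_inv (blocked : List (Int × Int)) (gd : Int × Int) :
    ∀ (ns : List (Int × Int)) (re fr : List (Int × Int)),
    (∀ p ∈ re, p ∈ (ns.foldl (floodStep blocked gd) (re, fr)).1) ∧
    (∀ c ∈ fr, c ∈ (ns.foldl (floodStep blocked gd) (re, fr)).2) ∧
    (∀ c ∈ (ns.foldl (floodStep blocked gd) (re, fr)).2, c ∈ fr ∨
      c ∈ (ns.foldl (floodStep blocked gd) (re, fr)).1) ∧
    (∀ p ∈ (ns.foldl (floodStep blocked gd) (re, fr)).1, p ∈ re ∨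
      (InGrid gd p ∧ p ∉ blocked ∧ p ∈ (ns.foldl (floodStep blocked gd) (re, fr)).2 ∧ p ∈ ns)) ∧
    (∀ n ∈ ns, InGrid gd n → n ∉ blocked → n ∈ (ns.foldl (floodStep blocked gd) (re, fr)).1) := by
  intro ns
  induction ns with
  | nil =>
    intro re fr
    refine ⟨fun p hp => hp, fun c hc => hc, fun c hc => Or.inl hc, fun p hp => Or.inl hp, ?_⟩
    intro n hn
    simp at hn
  | cons n ns ih =>
    intro re fr
    by_cases hc : 0 ≤ n.1 ∧ n.1 < gd.1 ∧ 0 ≤ n.2 ∧ n.2 < gd.2 ∧ n ∉ blocked ∧ n ∉ re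
    · have hstep : floodStep blocked gd (re, fr) n = (re ++ [n], fr ++ [n]) := by
        unfold floodStep
        rw [if_pos hc]
        rw [PySem.Set.add_of_not_mem hc.2.2.2.2.2]
      have hfold : (n :: ns).foldl (floodStep blocked gd) (re, fr)
          = ns.foldl (floodStep blocked gd) (re ++ [n], fr ++ [n]) := by
        simp [hstep]
      obtain ⟨a, b, c', d', e⟩ := ih (re ++ [n]) (fr ++ [n])
      rw [hfold]
      have hingrid : InGrid gd n := ⟨hc.1, hc.2.1, hc.2.2.1, hc.2.2.2.1⟩
      refine ⟨?_, ?_, ?_, ?_, ?_⟩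
      · intro p hp; exact a p (List.mem_append_left _ hp)
      · intro p hp; exact b p (List.mem_append_left _ hp)
      · intro p hp
        rcases c' p hp with h | h
        · rcases List.mem_append.mp h with h' | h'
          · exact Or.inl h'
          · simp only [List.mem_singleton] at h'
            subst h'
            exact Or.inr (a p (List.mem_append_right _ (by simp)))
        · exact Or.inr h
      · intro p hp
        rcases d' p hp with h | h
        · rcases List.mem_append.mp h with h' | h'
          · exact Or.inl h'
          · simp only [List.mem_singleton] at h'
            subst h'
            exact Or.inr ⟨hingrid, hc.2.2.2.2.1,
              b p (List.mem_append_right _ (by simp)), by simp⟩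
        · exact Or.inr ⟨h.1, h.2.1, h.2.2.1, List.mem_cons_of_mem _ h.2.2.2⟩
      · intro m hm hg hb
        rcases List.mem_cons.mp hm with rfl | hm'
        · exact a m (List.mem_append_right _ (by simp))
        · exact e m hm' hg hb
    · have hstep : floodStep blocked gd (re, fr) n = (re, fr) := by
        unfold floodStep
        rw [if_neg hc]
      have hfold : (n :: ns).foldl (floodStep blocked gd) (re, fr)
          = ns.foldl (floodStep blocked gd) (re, fr) := by
        simp [hstep]
      obtain ⟨a, b, c', d', e⟩ := ih re fr
      rw [hfold]
      refine ⟨a, b, c', ?_, ?_⟩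
      · intro p hp
        rcases d' p hp with h | h
        · exact Or.inl h
        · exact Or.inr ⟨h.1, h.2.1, h.2.2.1, List.mem_cons_of_mem _ h.2.2.2⟩
      · intro m hm hg hb
        rcases List.mem_cons.mp hm with rfl | hm'
        · have : m ∈ re := by
            by_contra hre
            exact hc ⟨hg.1, hg.2.1, hg.2.2.1, hg.2.2.2, hb, hre⟩
          exact a m this
        · exact e m hm' hg hb

theorem floodLoop_inv (blocked : List (Int × Int)) (gd : Int × Int) :
    ∀ (frontier reach : List (Int × Int)),
    (∀ c ∈ frontier, c ∈ reach) →
    (∀ p ∈ reach, Reach blocked gd p) →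
    (0, 0) ∈ reach →
    (∀ p ∈ reach, p ∈ frontier ∨ ∀ q, Adj p q → InGrid gd q → q ∉ blocked → q ∈ reach) →
    (∀ p ∈ reach, p ∈ floodLoop blocked gd reach frontier) ∧
    (∀ p ∈ floodLoop blocked gd reach frontier, Reach blocked gd p) ∧
    ((0, 0) ∈ floodLoop blocked gd reach frontier) ∧
    (∀ p ∈ floodLoop blocked gd reach frontier, ∀ q, Adj p q → InGrid gd q → q ∉ blocked →
      q ∈ floodLoop blocked gd reach frontier) := by
  intro frontier reach
  induction reach, frontier using floodLoop.induct blocked gd with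
  | case1 reach =>
    intro _ hsound hstart hcl
    have heq : floodLoop blocked gd reach [] = reach := by rw [floodLoop]
    rw [heq]
    refine ⟨fun p hp => hp, hsound, hstart, ?_⟩
    intro p hp q hadj hg hb
    rcases hcl p hp with h | h
    · simp at h
    · exact h q hadj hg hb
  | case2 reach r c rest st ih =>
    intro hfr hsound hstart hcl
    have heq : floodLoop blocked gd reach ((r, c) :: rest) = floodLoop blocked gd st.1 st.2 := by
      rw [floodLoop]
    obtain ⟨a, b, c', d', e⟩ :=
      floodFold_inv blocked gd [(r - 1, c), (r + 1, c), (r, c - 1), (r, c + 1)] reach rest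
    have hrc : (r, c) ∈ reach := hfr (r, c) List.mem_cons_self
    have hrcR : Reach blocked gd (r, c) := hsound (r, c) hrc
    have hsub : ∀ p ∈ reach, p ∈ st.1 := a
    have hsound' : ∀ p ∈ st.1, Reach blocked gd p := by
      intro p hp
      rcases d' p hp with h | h
      · exact hsound p h
      · have hadj : Adj (r, c) p := (mem_nbrs_iff r c p).mp h.2.2.2
        exact ReachF.step hrcR hadj h.1 h.2.1
    have hst : ∀ q ∈ st.2, q ∈ st.1 := by
      intro q hq
      rcases c' q hq with h | h
      · exact hsub q (hfr q (List.mem_cons_of_mem _ h))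
      · exact h
    have hcl' : ∀ p ∈ st.1, p ∈ st.2 ∨ ∀ q, Adj p q → InGrid gd q → q ∉ blocked → q ∈ st.1 := by
      intro p hp
      rcases d' p hp with h | h
      · rcases hcl p h with h' | h'
        · rcases List.mem_cons.mp h' with rfl | h''
          · refine Or.inr ?_
            intro q hadj hg hb
            exact e q ((mem_nbrs_iff r c q).mpr hadj) hg hb
          · exact Or.inl (b p h'')
        · refine Or.inr ?_
          intro q hadj hg hb
          exact hsub q (h' q hadj hg hb)
      · exact Or.inl h.2.2.1
    obtain ⟨ra, rb, rc', rd⟩ := ih hst hsound' (hsub _ hstart) hcl'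
    rw [heq]
    exact ⟨fun p hp => ra p (hsub p hp), rb, rc', rd⟩

theorem reach_char {blocked : List (Int × Int)} {gd : Int × Int} {R : List (Int × Int)}
    (hsound : ∀ p ∈ R, Reach blocked gd p) (hstart : (0, 0) ∈ R)
    (hcl : ∀ p ∈ R, ∀ q, Adj p q → InGrid gd q → q ∉ blocked → q ∈ R) (p : Int × Int) :
    p ∈ R ↔ Reach blocked gd p := by
  constructor
  · exact hsound p
  · intro h
    refine ReachF_closed (fun x => x ∈ R) (fun x hx => ?_) (fun a b ha => hcl a ha b) h
    subst hx; exact hstart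


-- ---- prefixes ----
def Conn (blocks : List (Int × Int)) (gd : Int × Int) (k : Nat) : Prop :=
  Reach (blocks.take k) gd (gd.1 - 1, gd.2 - 1)

theorem Conn_antitone {blocks : List (Int × Int)} {gd : Int × Int} {k k' : Nat}
    (h : k ≤ k') (hc : Conn blocks gd k') : Conn blocks gd k := by
  apply ReachF_mono (fun _ h => h) _ hc
  intro x hx
  have : x ∈ (blocks.take k').take k := by
    rw [List.take_take, Nat.min_eq_left h]; exact hx
  exact (List.take_prefix k _).subset this

-- ---- A characterised ----
theorem gbcLoop_spec (blocks : List (Int × Int)) (gd : Int × Int) :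
    ∀ (n : Nat) (lo hi : Int), (hi - lo).toNat ≤ n → 0 ≤ lo → lo ≤ hi →
    hi ≤ (blocks.length : Int) - 1 →
    (∀ j : Int, 0 ≤ j → j < lo → Conn blocks gd (j + 1).toNat) →
    (hi = (blocks.length : Int) - 1 ∨ ¬ Conn blocks gd (hi + 1).toNat) →
    ∃ m : Int, gbcLoop blocks gd lo hi = PySem.List.pyGetD blocks m (0, 0) ∧ lo ≤ m ∧ m ≤ hi ∧
      (∀ j : Int, 0 ≤ j → j < m → Conn blocks gd (j + 1).toNat) ∧
      (m = (blocks.length : Int) - 1 ∨ ¬ Conn blocks gd (m + 1).toNat) := by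
  intro n
  induction n with
  | zero =>
    intro lo hi h0 hl0 hlh hhi hjlt hdisj
    have hle : lo = hi := by omega
    subst hle
    have heq : gbcLoop blocks gd lo lo = PySem.List.pyGetD blocks lo (0, 0) := by
      rw [gbcLoop]; simp
    exact ⟨lo, heq, le_rfl, le_rfl, hjlt, hdisj⟩
  | succ n ih =>
    intro lo hi h0 hl0 hlh hhi hjlt hdisj
    by_cases hlt : lo < hi
    · have hmb := PySem.Int.floordiv_two_mid_bounds (le_of_lt hlt)
      have hmlt : PySem.Int.floordiv (lo + hi) 2 < hi := by
        rw [PySem.Int.floordiv_lt_iff_lt_mul (by omega)]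
        omega
      set mid := PySem.Int.floordiv (lo + hi) 2 with hmid
      by_cases hcs : count_steps (PySem.List.slice blocks none (some (mid + 1))) gd ≠ -1
      · have heq : gbcLoop blocks gd lo hi = gbcLoop blocks gd (mid + 1) hi := by
          rw [gbcLoop]
          simp only [dif_pos hlt, ← hmid, if_pos hcs]
        have hconn : Conn blocks gd (mid + 1).toNat := by
          unfold Conn
          rw [PySem.List.slice_to blocks (by omega : (0:Int) ≤ mid + 1)] at hcs
          exact (count_steps_iff _ gd).mp hcs
        have hjlt' : ∀ j : Int, 0 ≤ j → j < mid + 1 → Conn blocks gd (j + 1).toNat := by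
          intro j hj0 hjm
          by_cases hjlo : j < lo
          · exact hjlt j hj0 hjlo
          · exact Conn_antitone (by omega) hconn
        obtain ⟨m, hm, hm1, hm2, hm3, hm4⟩ := ih (mid + 1) hi (by omega) (by omega) (by omega)
          hhi hjlt' hdisj
        exact ⟨m, heq ▸ hm, by omega, hm2, hm3, hm4⟩
      · rw [not_ne_iff] at hcs
        have heq : gbcLoop blocks gd lo hi = gbcLoop blocks gd lo mid := by
          rw [gbcLoop]
          simp only [dif_pos hlt, ← hmid, if_neg (by simpa using hcs :
            ¬ count_steps (PySem.List.slice blocks none (some (mid + 1))) gd ≠ -1)]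
        have hnconn : ¬ Conn blocks gd (mid + 1).toNat := by
          unfold Conn
          intro hr
          rw [PySem.List.slice_to blocks (by omega : (0:Int) ≤ mid + 1)] at hcs
          exact (count_steps_iff _ gd).mpr hr hcs
        obtain ⟨m, hm, hm1, hm2, hm3, hm4⟩ := ih lo mid (by omega) hl0 (by omega)
          (by omega) hjlt (Or.inr hnconn)
        exact ⟨m, heq ▸ hm, hm1, by omega, hm3, hm4⟩
    · have hle : lo = hi := by omega
      subst hle
      have heq : gbcLoop blocks gd lo lo = PySem.List.pyGetD blocks lo (0, 0) := by
        rw [gbcLoop]; simp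
      exact ⟨lo, heq, le_rfl, le_rfl, hjlt, hdisj⟩

-- ---- the first-occurrence dict ----
theorem buildFirstAux_get (c : Int × Int) :
    ∀ (xs : List (Int × Int)) (s : Int) (d : PySem.Dict (Int × Int) Int),
    ((PySem.List.enumerate xs s).foldl
        (fun d p => if d.contains p.2 then d else d.insert p.2 p.1) d).get? c
      = if (d.get? c).isSome then d.get? c
        else (PySem.List.index? xs c).map (fun n => s + (n : Int)) := by
  intro xs
  induction xs with
  | nil =>
    intro s d
    rw [PySem.List.enumerate_nil]
    simp only [List.foldl_nil]
    rw [show PySem.List.index? ([] : List (Int × Int)) c = none by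
      rw [PySem.List.index?_eq_idxOf?]; simp]
    cases h : d.get? c <;> simp [h]
  | cons x xs ih =>
    intro s d
    rw [PySem.List.enumerate_cons]
    show ((PySem.List.enumerate xs (s + 1)).foldl
        (fun d p => if d.contains p.2 then d else d.insert p.2 p.1)
        (if d.contains x then d else d.insert x s)).get? c = _
    by_cases hx : x = c
    · subst hx
      by_cases hd : d.contains x
      · rw [if_pos hd, ih]
        have hsome : (d.get? x).isSome := by
          rw [← PySem.Dict.contains_eq_isSome_get?]; exact hd
        simp [hsome]
      · rw [if_neg hd, ih]
        have hnone : d.get? x = none := by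
          rw [← Option.not_isSome_iff_eq_none]
          intro hs
          exact hd (by rw [PySem.Dict.contains_eq_isSome_get?]; exact hs)
        have hins : (d.insert x s).get? x = some s := PySem.Dict.get?_insert_self d x s
        rw [PySem.List.index?_cons_self]
        simp [hins, hnone]
    · have hxc : x ≠ c := hx
      rw [PySem.List.index?_cons_of_ne xs hxc]
      by_cases hd : d.contains x
      · rw [if_pos hd, ih]
        cases hidx : PySem.List.index? xs c <;>
          cases hg : d.get? c <;>
          simp [hidx, hg] <;> push_cast <;> ring
      · rw [if_neg hd, ih]
        have hne : (d.insert x s).get? c = d.get? c := by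
          rw [PySem.Dict.get?_insert]
          rw [if_neg (fun h => hxc h.symm)]
        rw [hne]
        cases hidx : PySem.List.index? xs c <;>
          cases hg : d.get? c <;>
          simp [hidx, hg] <;> push_cast <;> ring

theorem buildFirst_get (blocks : List (Int × Int)) (c : Int × Int) :
    (buildFirst blocks).get? c = (PySem.List.index? blocks c).map (fun n => (n : Int)) := by
  unfold buildFirst
  rw [buildFirstAux_get c blocks 0 PySem.Dict.empty]
  rw [PySem.Dict.get?_empty]
  simp

theorem mem_keys_buildFirst (blocks : List (Int × Int)) (c : Int × Int) :
    c ∈ (buildFirst blocks).keys ↔ c ∈ blocks := by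
  rw [← not_iff_not]
  rw [← PySem.Dict.get?_eq_none_iff_not_mem_keys]
  rw [buildFirst_get]
  rw [← PySem.List.index?_eq_none_iff (xs := blocks) (v := c)]
  cases h : PySem.List.index? blocks c <;> simp [h]

theorem index?_getElem_iff (blocks : List (Int × Int)) (i : Nat) (h : i < blocks.length) :
    PySem.List.index? blocks blocks[i] = some i ↔ blocks[i] ∉ blocks.take i := by
  constructor
  · intro hidx
    obtain ⟨pre, suf, hxs, hlen, hnot⟩ := (PySem.List.index?_eq_some_iff _ _ _).mp hidx
    have hpre : blocks.take i = pre := by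
      conv_lhs => rw [hxs]
      exact List.take_left' hlen
    rw [hpre]
    exact hnot
  · intro hnot
    refine (PySem.List.index?_eq_some_iff _ _ _).mpr
      ⟨blocks.take i, blocks.drop (i + 1), ?_, by simp [List.length_take]; omega, hnot⟩
    conv_lhs => rw [← List.take_append_drop i blocks]
    rw [List.drop_eq_getElem_cons h]

-- ---- B characterised ----
theorem adj_symm {p q : Int × Int} (h : Adj p q) : Adj q p := by
  rcases h with h | h | h | h <;> subst h <;> simp [Adj, Prod.ext_iff] <;> omega

-- the state update of one iteration of B's reverse sweep (proof-side name for the `st` let)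
def downSt (blocks : List (Int × Int)) (gd : Int × Int) (blocked reach : List (Int × Int))
    (i : Nat) : List (Int × Int) × List (Int × Int) :=
  let b := PySem.List.pyGetD blocks (i : Int) (0, 0)
  if (buildFirst blocks).get? b = some (i : Int) then
    let bl := PySem.Set.discard blocked b
    if (0 ≤ b.1 ∧ b.1 < gd.1 ∧ 0 ≤ b.2 ∧ b.2 < gd.2) ∧ b ∉ reach ∧
        (b = (0, 0) ∨ (b.1 - 1, b.2) ∈ reach ∨ (b.1 + 1, b.2) ∈ reach ∨
          (b.1, b.2 - 1) ∈ reach ∨ (b.1, b.2 + 1) ∈ reach) then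
      (bl, floodLoop bl gd (PySem.Set.add reach b) [b])
    else (bl, reach)
  else (blocked, reach)

theorem downLoop_eq (blocks : List (Int × Int)) (gd : Int × Int)
    (blocked reach : List (Int × Int)) (i : Nat) :
    downLoop blocks gd (buildFirst blocks) blocked reach i
      = if (gd.1 - 1, gd.2 - 1) ∈ (downSt blocks gd blocked reach i).2 then
          PySem.List.pyGetD blocks (i : Int) (0, 0)
        else match i with
          | 0 => PySem.List.pyGetD blocks 0 (0, 0)
          | i' + 1 => downLoop blocks gd (buildFirst blocks)
              (downSt blocks gd blocked reach i).1 (downSt blocks gd blocked reach i).2 i' := by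
  rw [downLoop.eq_def]
  rfl

theorem pyGetD_nat (blocks : List (Int × Int)) (i : Nat) (h : i < blocks.length) :
    PySem.List.pyGetD blocks (i : Int) (0, 0) = blocks[i] := by
  rw [PySem.List.pyGetD_natCast]
  exact List.getD_eq_getElem blocks (0, 0) h

theorem buildFirst_get_self_iff (blocks : List (Int × Int)) (i : Nat) (h : i < blocks.length) :
    (buildFirst blocks).get? blocks[i] = some (i : Int) ↔ blocks[i] ∉ blocks.take i := by
  cases hidx : PySem.List.index? blocks blocks[i] with
  | none =>
    exact absurd ((PySem.List.index?_eq_none_iff blocks blocks[i]).mp hidx)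
      (fun hn => hn (List.getElem_mem h))
  | some k =>
    rw [buildFirst_get, hidx]
    constructor
    · intro hk
      have hk2 : (k : Int) = (i : Int) := Option.some.inj hk
      have hk3 : k = i := by exact_mod_cast hk2
      rw [hk3] at hidx
      exact (index?_getElem_iff blocks i h).mp hidx
    · intro hni
      have h2 := (index?_getElem_iff blocks i h).mpr hni
      rw [hidx] at h2
      have hk : k = i := by injection h2
      rw [hk]
      rfl

theorem downSt_inv (blocks : List (Int × Int)) (gd : Int × Int)
    (blocked reach : List (Int × Int)) (i : Nat) (hlen : i < blocks.length)
    (Hmem : ∀ x, x ∈ blocked ↔ x ∈ blocks.take (i + 1))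
    (Hsound : ∀ p ∈ reach, Reach blocked gd p)
    (Hstart : (0, 0) ∈ reach)
    (Hcl : ∀ p ∈ reach, ∀ q, Adj p q → InGrid gd q → q ∉ blocked → q ∈ reach) :
    (∀ x, x ∈ (downSt blocks gd blocked reach i).1 ↔ x ∈ blocks.take i) ∧
    (∀ p ∈ (downSt blocks gd blocked reach i).2,
      Reach (downSt blocks gd blocked reach i).1 gd p) ∧
    ((0, 0) ∈ (downSt blocks gd blocked reach i).2) ∧
    (∀ p ∈ (downSt blocks gd blocked reach i).2, ∀ q, Adj p q → InGrid gd q →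
      q ∉ (downSt blocks gd blocked reach i).1 → q ∈ (downSt blocks gd blocked reach i).2) := by
  have htake : blocks.take (i + 1) = blocks.take i ++ [blocks[i]] := by
    rw [List.take_succ, List.getElem?_eq_getElem hlen]
    rfl
  have hmem1 : ∀ x : Int × Int, x ∈ blocks.take (i + 1) ↔ x ∈ blocks.take i ∨ x = blocks[i] := by
    intro x; rw [htake, List.mem_append, List.mem_singleton]
  unfold downSt
  rw [pyGetD_nat blocks i hlen]
  by_cases h1 : (buildFirst blocks).get? blocks[i] = some (i : Int)
  · rw [if_pos h1]
    have hnotin : blocks[i] ∉ blocks.take i := (buildFirst_get_self_iff blocks i hlen).mp h1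
    have hblm : ∀ x, x ∈ PySem.Set.discard blocked blocks[i] ↔ x ∈ blocks.take i := by
      intro x
      rw [PySem.Set.mem_discard blocked blocks[i] x, Hmem x, hmem1 x]
      constructor
      · rintro ⟨h | rfl, hne⟩
        · exact h
        · exact absurd rfl hne
      · intro hx
        exact ⟨Or.inl hx, fun he => hnotin (he ▸ hx)⟩
    have hblsub : ∀ x ∈ PySem.Set.discard blocked blocks[i], x ∈ blocked :=
      fun x hx => ((PySem.Set.mem_discard blocked blocks[i] x).mp hx).1
    have hsound_bl : ∀ p ∈ reach, Reach (PySem.Set.discard blocked blocks[i]) gd p :=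
      fun p hp => ReachF_mono (fun _ h => h) hblsub (Hsound p hp)
    have hnotbl : blocks[i] ∉ PySem.Set.discard blocked blocks[i] := by
      rw [PySem.Set.mem_discard]
      simp
    by_cases h2 : (0 ≤ blocks[i].1 ∧ blocks[i].1 < gd.1 ∧ 0 ≤ blocks[i].2 ∧ blocks[i].2 < gd.2) ∧
        blocks[i] ∉ reach ∧
        (blocks[i] = (0, 0) ∨ (blocks[i].1 - 1, blocks[i].2) ∈ reach ∨
          (blocks[i].1 + 1, blocks[i].2) ∈ reach ∨ (blocks[i].1, blocks[i].2 - 1) ∈ reach ∨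
          (blocks[i].1, blocks[i].2 + 1) ∈ reach)
    · rw [if_pos h2]
      have hingrid : InGrid gd blocks[i] := ⟨h2.1.1, h2.1.2.1, h2.1.2.2.1, h2.1.2.2.2⟩
      have hra : ∀ y, y ∈ PySem.Set.add reach blocks[i] ↔ y ∈ reach ∨ y = blocks[i] :=
        fun y => PySem.Set.mem_add reach blocks[i] y
      have hreachb : Reach (PySem.Set.discard blocked blocks[i]) gd blocks[i] := by
        rcases h2.2.2 with h | h | h | h | h
        · rw [h]; exact ReachF.base rfl
        · exact ReachF.step (hsound_bl _ h)
            (by simp [Adj, Prod.ext_iff]) hingrid hnotbl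
        · exact ReachF.step (hsound_bl _ h)
            (by simp [Adj, Prod.ext_iff]) hingrid hnotbl
        · exact ReachF.step (hsound_bl _ h)
            (by simp [Adj, Prod.ext_iff]) hingrid hnotbl
        · exact ReachF.step (hsound_bl _ h)
            (by simp [Adj, Prod.ext_iff]) hingrid hnotbl
      obtain ⟨fa, fb_, fc, fd⟩ := floodLoop_inv (PySem.Set.discard blocked blocks[i]) gd
        [blocks[i]] (PySem.Set.add reach blocks[i])
        (by
          intro c hc
          simp only [List.mem_singleton] at hc
          subst hc
          exact (hra _).mpr (Or.inr rfl))
        (by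
          intro p hp
          rcases (hra p).mp hp with h | rfl
          · exact hsound_bl p h
          · exact hreachb)
        ((hra _).mpr (Or.inl Hstart))
        (by
          intro p hp
          rcases (hra p).mp hp with h | rfl
          · refine Or.inr ?_
            intro q hadj hg hnb
            by_cases hqb : q ∈ blocked
            · have hq : q = blocks[i] := by
                by_contra hne
                exact hnb ((PySem.Set.mem_discard blocked blocks[i] q).mpr ⟨hqb, hne⟩)
              exact (hra q).mpr (Or.inr hq)
            · exact (hra q).mpr (Or.inl (Hcl p h q hadj hg hqb))
          · exact Or.inl (List.mem_singleton.mpr rfl))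
      exact ⟨hblm, fb_, fc, fd⟩
    · rw [if_neg h2]
      refine ⟨hblm, hsound_bl, Hstart, ?_⟩
      intro p hp q hadj hg hnb
      by_cases hqb : q ∈ blocked
      · have hq : q = blocks[i] := by
          by_contra hne
          exact hnb ((PySem.Set.mem_discard blocked blocks[i] q).mpr ⟨hqb, hne⟩)
        subst hq
        by_cases hbr : blocks[i] ∈ reach
        · exact hbr
        · exfalso
          apply h2
          refine ⟨⟨hg.1, hg.2.1, hg.2.2.1, hg.2.2.2⟩, hbr, ?_⟩
          have hadj' : Adj blocks[i] p := adj_symm hadj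
          have hp4 : p ∈ [(blocks[i].1 - 1, blocks[i].2), (blocks[i].1 + 1, blocks[i].2),
              (blocks[i].1, blocks[i].2 - 1), (blocks[i].1, blocks[i].2 + 1)] :=
            (mem_nbrs_iff blocks[i].1 blocks[i].2 p).mpr hadj'
          simp only [List.mem_cons, List.mem_singleton, List.not_mem_nil, or_false] at hp4
          rcases hp4 with rfl | rfl | rfl | rfl
          · exact Or.inr (Or.inl hp)
          · exact Or.inr (Or.inr (Or.inl hp))
          · exact Or.inr (Or.inr (Or.inr (Or.inl hp)))
          · exact Or.inr (Or.inr (Or.inr (Or.inr hp)))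
      · exact Hcl p hp q hadj hg hqb
  · rw [if_neg h1]
    have hin : blocks[i] ∈ blocks.take i :=
      not_not.mp (fun hn => h1 ((buildFirst_get_self_iff blocks i hlen).mpr hn))
    have hmm : ∀ x, x ∈ blocked ↔ x ∈ blocks.take i := by
      intro x
      rw [Hmem x, hmem1 x]
      constructor
      · rintro (h | rfl)
        · exact h
        · exact hin
      · exact Or.inl
    exact ⟨hmm, Hsound, Hstart, Hcl⟩

theorem downSt_conn (blocks : List (Int × Int)) (gd : Int × Int)
    (blocked reach : List (Int × Int)) (i : Nat) (hlen : i < blocks.length)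
    (Hmem : ∀ x, x ∈ blocked ↔ x ∈ blocks.take (i + 1))
    (Hsound : ∀ p ∈ reach, Reach blocked gd p)
    (Hstart : (0, 0) ∈ reach)
    (Hcl : ∀ p ∈ reach, ∀ q, Adj p q → InGrid gd q → q ∉ blocked → q ∈ reach) :
    ((gd.1 - 1, gd.2 - 1) ∈ (downSt blocks gd blocked reach i).2) ↔ Conn blocks gd i := by
  obtain ⟨hm, hs, hst, hc⟩ := downSt_inv blocks gd blocked reach i hlen Hmem Hsound Hstart Hcl
  unfold Conn
  rw [reach_char hs hst hc]
  exact Reach_congr hm _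

theorem downLoop_spec (blocks : List (Int × Int)) (gd : Int × Int) :
    ∀ (i : Nat) (blocked reach : List (Int × Int)), i < blocks.length →
    (∀ x, x ∈ blocked ↔ x ∈ blocks.take (i + 1)) →
    (∀ p ∈ reach, Reach blocked gd p) →
    (0, 0) ∈ reach →
    (∀ p ∈ reach, ∀ q, Adj p q → InGrid gd q → q ∉ blocked → q ∈ reach) →
    ¬ Conn blocks gd (i + 1) →
    ∃ m : Nat, downLoop blocks gd (buildFirst blocks) blocked reach i
        = PySem.List.pyGetD blocks (m : Int) (0, 0) ∧
      m ≤ i ∧ (Conn blocks gd m ∨ m = 0) ∧ (∀ k : Nat, m < k → k ≤ i → ¬ Conn blocks gd k) := by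
  intro i
  induction i with
  | zero =>
    intro blocked reach hlen Hmem Hsound Hstart Hcl _
    have hconn := downSt_conn blocks gd blocked reach 0 hlen Hmem Hsound Hstart Hcl
    rw [downLoop_eq]
    by_cases hchk : (gd.1 - 1, gd.2 - 1) ∈ (downSt blocks gd blocked reach 0).2
    · rw [if_pos hchk]
      exact ⟨0, rfl, le_rfl, Or.inl (hconn.mp hchk),
        fun k hk1 hk2 => absurd (Nat.lt_of_lt_of_le hk1 hk2) (Nat.lt_irrefl 0)⟩
    · rw [if_neg hchk]
      exact ⟨0, rfl, le_rfl, Or.inr rfl,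
        fun k hk1 hk2 => absurd (Nat.lt_of_lt_of_le hk1 hk2) (Nat.lt_irrefl 0)⟩
  | succ i' ih =>
    intro blocked reach hlen Hmem Hsound Hstart Hcl _
    obtain ⟨hm, hs, hst, hc⟩ :=
      downSt_inv blocks gd blocked reach (i' + 1) hlen Hmem Hsound Hstart Hcl
    have hconn := downSt_conn blocks gd blocked reach (i' + 1) hlen Hmem Hsound Hstart Hcl
    rw [downLoop_eq]
    by_cases hchk : (gd.1 - 1, gd.2 - 1) ∈ (downSt blocks gd blocked reach (i' + 1)).2
    · rw [if_pos hchk]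
      exact ⟨i' + 1, rfl, le_rfl, Or.inl (hconn.mp hchk),
        fun k hk1 hk2 => absurd (Nat.lt_of_lt_of_le hk1 hk2) (Nat.lt_irrefl _)⟩
    · rw [if_neg hchk]
      have hnc : ¬ Conn blocks gd (i' + 1) := fun h => hchk (hconn.mpr h)
      obtain ⟨m, hme, hm1, hm2, hm3⟩ :=
        ih (downSt blocks gd blocked reach (i' + 1)).1 (downSt blocks gd blocked reach (i' + 1)).2
          (by omega) hm hs hst hc hnc
      refine ⟨m, hme, by omega, hm2, ?_⟩
      intro k hk1 hk2
      rcases Nat.lt_or_ge k (i' + 1) with h | h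
      · exact hm3 k hk1 (by omega)
      · have hk : k = i' + 1 := by omega
        subst hk
        exact hnc

-- ===== VERDICT (by name: the statement is the Claim_ definition above) =====
theorem get_blocking_coordinates_spec : Claim_equal_get_blocking_coordinates := by
  intro blocks gd _ hpre
  unfold Spec_get_blocking_coordinates
  have hpre' : blocks ≠ [] := hpre
  have hlen1 : 0 < blocks.length := List.length_pos_iff.mpr hpre'
  -- characterise A
  obtain ⟨mA, hA, hA1, hA2, hA3, hA4⟩ := gbcLoop_spec blocks gd
    ((blocks.length : Int) - 1).toNat 0 ((blocks.length : Int) - 1)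
    (by omega) le_rfl (by omega) le_rfl
    (fun j hj0 hjlt => absurd hjlt (by omega)) (Or.inl rfl)
  -- characterise B's initial flood
  have hof : PySem.Set.ofList [((0 : Int), (0 : Int))] = [(0, 0)] := rfl
  obtain ⟨fa, fb_, fc, fd⟩ := floodLoop_inv (PySem.Set.ofList (buildFirst blocks).keys) gd
    [(0, 0)] (PySem.Set.ofList [((0 : Int), (0 : Int))])
    (by intro c hc; rw [hof]; exact hc)
    (by
      intro p hp
      rw [hof] at hp
      simp only [List.mem_singleton] at hp
      subst hp
      exact ReachF.base rfl)
    (by rw [hof]; simp)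
    (by intro p hp; rw [hof] at hp; exact Or.inl hp)
  have hmem0 : ∀ x, x ∈ PySem.Set.ofList (buildFirst blocks).keys ↔
      x ∈ blocks.take blocks.length := by
    intro x
    rw [PySem.Set.mem_ofList, mem_keys_buildFirst, List.take_length]
  have hBeq : get_blocking_coordinates_alt blocks gd
      = if (gd.1 - 1, gd.2 - 1) ∈ floodLoop (PySem.Set.ofList (buildFirst blocks).keys) gd
            (PySem.Set.ofList [((0 : Int), (0 : Int))]) [(0, 0)] then
          PySem.List.pyGetD blocks (-1) (0, 0)
        else downLoop blocks gd (buildFirst blocks) (PySem.Set.ofList (buildFirst blocks).keys)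
          (floodLoop (PySem.Set.ofList (buildFirst blocks).keys) gd
            (PySem.Set.ofList [((0 : Int), (0 : Int))]) [(0, 0)])
          (blocks.length - 1) := rfl
  have hchk0 : ((gd.1 - 1, gd.2 - 1) ∈ floodLoop (PySem.Set.ofList (buildFirst blocks).keys) gd
      (PySem.Set.ofList [((0 : Int), (0 : Int))]) [(0, 0)]) ↔ Conn blocks gd blocks.length := by
    show _ ↔ Reach (blocks.take blocks.length) gd _
    rw [reach_char fb_ fc fd]
    exact Reach_congr hmem0 _
  show gbcLoop blocks gd 0 ((blocks.length : Int) - 1) = _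
  by_cases hc0 : (gd.1 - 1, gd.2 - 1) ∈ floodLoop (PySem.Set.ofList (buildFirst blocks).keys) gd
      (PySem.Set.ofList [((0 : Int), (0 : Int))]) [(0, 0)]
  · have hcfull : Conn blocks gd blocks.length := hchk0.mp hc0
    have hmAval : mA = ((blocks.length - 1 : Nat) : Int) := by
      rcases hA4 with h | h
      · omega
      · exact absurd (Conn_antitone (by omega) hcfull) h
    rw [hBeq, if_pos hc0, hA, hmAval, pyGetD_nat blocks (blocks.length - 1) (by omega)]
    rw [PySem.List.pyGetD_neg_one blocks (0, 0) hpre']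
    rw [List.getLast_eq_getElem]
  · have hnc : ¬ Conn blocks gd blocks.length := fun h => hc0 (hchk0.mpr h)
    have hsub1 : blocks.length - 1 + 1 = blocks.length := by omega
    obtain ⟨mB, hB, hB1, hB2, hB3⟩ := downLoop_spec blocks gd (blocks.length - 1)
      (PySem.Set.ofList (buildFirst blocks).keys)
      (floodLoop (PySem.Set.ofList (buildFirst blocks).keys) gd
        (PySem.Set.ofList [((0 : Int), (0 : Int))]) [(0, 0)])
      (by omega) (by rw [hsub1]; exact hmem0) fb_ fc fd (by rw [hsub1]; exact hnc)
    rw [hBeq, if_neg hc0, hB, hA]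
    congr 1
    by_contra hne
    rcases lt_or_gt_of_ne hne with hlt | hgt
    · rcases hB2 with hconnB | hmB0
      · rcases hA4 with hAe | hAn
        · omega
        · exact hAn (Conn_antitone (by omega) hconnB)
      · omega
    · have h1 : Conn blocks gd (((mB : Int)) + 1).toNat := hA3 (mB : Int) (by omega) (by omega)
      have h2 : ¬ Conn blocks gd (mB + 1) := hB3 (mB + 1) (by omega) (by omega)
      rw [show (((mB : Int)) + 1).toNat = mB + 1 by omega] at h1
      exact h2 h1
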